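-- pv_equiv track=rewrite | github.com/amol179/DSA_Notes_Dump | CH_3/Sec_3.2/spin.py | find_alignment_time
-- ===== SOURCE A (Python) =====
-- def get_open_angles(speed, wedges, time):
--     open_angles = [False] * 360
--     for start, extent in wedges:
--         rotated_start = (start + speed * time) % 360
--         for i in range(extent + 1):  # inclusive extent
--             angle = (rotated_start + i) % 360
--             open_angles[angle] = True
--     return open_angles
--
-- def find_alignment_time(wheels):
--     for t in range(360):  # simulate up to 360 seconds
--         all_open = [True] * 360
--         for speed, wedges in wheels:
--             current_open = get_open_angles(speed, wedges, t)
--             for i in range(360):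
--                 all_open[i] = all_open[i] and current_open[i]
--         for i in range(360):
--             if all_open[i]:
--                 return t
--     return None
-- ===== SOURCE B (Python) =====
-- def find_alignment_time(wheels):
--     # An angle a is open on a wheel at time t iff some wedge (start, extent)
--     # satisfies (a - start - speed*t) % 360 <= extent: test that arithmetic
--     # condition directly instead of painting 360-entry boolean arrays.
--     def is_open(speed, wedges, t, a):
--         return any((a - start - speed * t) % 360 <= extent for start, extent in wedges)
--
--     for t in range(360):
--         if any(all(is_open(speed, wedges, t, a) for speed, wedges in wheels) for a in range(360)):
--             return t
--     return None
-- ===== Notes on version B (the rewrite author's own statement) =====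
-- stated objective: simpler
-- what changed: B replaces A's painted 360-entry boolean arrays (mark every wedge angle, AND the arrays, scan for a true) with a direct arithmetic openness test: angle a is open on a wheel at time t iff some wedge satisfies (a - start - speed*t) % 360 <= extent, so no arrays are built at all.
import Mathlib
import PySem

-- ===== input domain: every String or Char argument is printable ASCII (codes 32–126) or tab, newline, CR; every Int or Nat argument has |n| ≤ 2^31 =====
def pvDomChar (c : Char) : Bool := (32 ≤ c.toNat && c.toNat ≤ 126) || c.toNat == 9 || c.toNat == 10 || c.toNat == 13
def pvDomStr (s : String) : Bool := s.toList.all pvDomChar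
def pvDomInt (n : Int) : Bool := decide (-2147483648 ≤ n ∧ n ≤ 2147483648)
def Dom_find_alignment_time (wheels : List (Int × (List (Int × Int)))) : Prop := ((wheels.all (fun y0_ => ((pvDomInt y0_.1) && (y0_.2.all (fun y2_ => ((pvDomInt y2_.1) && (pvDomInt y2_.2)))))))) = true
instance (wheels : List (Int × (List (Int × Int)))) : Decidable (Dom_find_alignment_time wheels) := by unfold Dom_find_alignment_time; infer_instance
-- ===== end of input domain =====

-- B replaces A's painted 360-entry boolean arrays by a direct arithmetic openness
-- test per (time, angle); objective: simpler (return value only; neither mutates input).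

-- ===== PORT A =====
-- Python's 360-entry boolean lists are ported as Array Bool; every index written or read
-- is a value of range(360) or (… % 360), hence a nonnegative Int below 360, so
-- .toNat / setIfInBounds / getD are exact for Python's in-range list store and load.
def get_open_angles (speed : Int) (wedges : List (Int × Int)) (time : Int) : Array Bool :=
  wedges.foldl (fun oa w =>
    let rotated_start := PySem.Int.mod (w.1 + speed * time) 360
    (PySem.List.pyRange 0 (w.2 + 1) 1).foldl (fun oa i =>
      oa.setIfInBounds (PySem.Int.mod (rotated_start + i) 360).toNat true) oa)
    (Array.replicate 360 false)

-- body of one iteration of A's outer time loop: the accumulated all_open array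
def aBody (wheels : List (Int × (List (Int × Int)))) (t : Int) : Array Bool :=
  wheels.foldl (fun all_open w =>
    let current_open := get_open_angles w.1 w.2 t
    (PySem.List.pyRange 0 360 1).foldl (fun ao i =>
      ao.setIfInBounds i.toNat (ao.getD i.toNat false && current_open.getD i.toNat false)) all_open)
    (Array.replicate 360 true)

def aLoop (wheels : List (Int × (List (Int × Int)))) (t : Nat) : Option Int :=
  if t < 360 then
    let all_open := aBody wheels ↑t
    if (PySem.List.pyRange 0 360 1).any (fun i => all_open.getD i.toNat false) then
      some ↑t
    else aLoop wheels (t + 1)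
  else none
termination_by 360 - t

def find_alignment_time (wheels : List (Int × (List (Int × Int)))) : Option Int :=
  aLoop wheels 0

-- ===== PORT B =====
def is_open (speed : Int) (wedges : List (Int × Int)) (t a : Int) : Bool :=
  wedges.any (fun wd => decide (PySem.Int.mod (a - wd.1 - speed * t) 360 ≤ wd.2))

def bLoop (wheels : List (Int × (List (Int × Int)))) (t : Nat) : Option Int :=
  if t < 360 then
    if (PySem.List.pyRange 0 360 1).any (fun a => wheels.all (fun w => is_open w.1 w.2 ↑t a)) then
      some ↑t
    else bLoop wheels (t + 1)
  else none
termination_by 360 - t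

def find_alignment_time_alt (wheels : List (Int × (List (Int × Int)))) : Option Int :=
  bLoop wheels 0

-- ===== PRECONDITION & SPEC =====
def Spec_find_alignment_time (wheels : List (Int × (List (Int × Int)))) (out : Option Int) : Prop := out = find_alignment_time_alt wheels
instance (wheels : List (Int × (List (Int × Int)))) (out : Option Int) : Decidable (Spec_find_alignment_time wheels out) := by unfold Spec_find_alignment_time; infer_instance

-- ===== CLAIM (what is proved, stated in full; the proofs are below) =====
def Claim_equal_find_alignment_time : Prop := ∀ (wheels : List (Int × (List (Int × Int)))), Dom_find_alignment_time wheels → Spec_find_alignment_time wheels (find_alignment_time wheels)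

-- ===== LEMMAS AND PROOFS =====

lemma pmod360 (x : Int) : PySem.Int.mod x 360 = x % 360 :=
  PySem.Int.mod_eq_emod_of_pos (by norm_num)

lemma any_congr {α : Type} (l : List α) (p q : α → Bool)
    (h : ∀ x ∈ l, p x = q x) : l.any p = l.any q := by
  induction l with
  | nil => rfl
  | cons x xs ih =>
    simp only [List.any_cons, h x (by simp), ih (fun y hy => h y (by simp [hy]))]

lemma paint_size (rs : Int) : ∀ (l : List Int) (oa : Array Bool),
    (l.foldl (fun oa i => oa.setIfInBounds ((rs + i) % 360).toNat true) oa).size = oa.size := by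
  intro l
  induction l with
  | nil => intro oa; rfl
  | cons x xs ih =>
    intro oa
    simp only [List.foldl_cons]
    rw [ih]
    simp [Array.size_setIfInBounds]

lemma and_size (cur : Array Bool) : ∀ (l : List Int) (ao : Array Bool),
    (l.foldl (fun ao i => ao.setIfInBounds i.toNat (ao.getD i.toNat false && cur.getD i.toNat false)) ao).size = ao.size := by
  intro l
  induction l with
  | nil => intro ao; rfl
  | cons x xs ih =>
    intro ao
    simp only [List.foldl_cons]
    rw [ih]
    simp [Array.size_setIfInBounds]

-- the inner painting loop of get_open_angles, characterised pointwise
lemma paint_getD (rs : Int) :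
    ∀ (n : Nat) (oa : Array Bool) (a : Nat), oa.size = 360 → a < 360 →
      (((List.range n).map (fun (k : Nat) => (k : Int))).foldl
          (fun oa i => oa.setIfInBounds ((rs + i) % 360).toNat true) oa).getD a false
        = (oa.getD a false || decide ((((a:Int) - rs) % 360) < n)) := by
  intro n
  induction n with
  | zero =>
    intro oa a h ha
    have hx : ¬ ((((a:Int) - rs) % 360) < (((0:Nat)):Int)) := by omega
    simp only [List.range_zero, List.map_nil, List.foldl_nil, decide_eq_false hx, Bool.or_false]
  | succ n ih =>
    intro oa a h ha
    rw [List.range_succ, List.map_append, List.foldl_append]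
    simp only [List.map_cons, List.map_nil, List.foldl_cons, List.foldl_nil]
    set P := ((List.range n).map (fun (k : Nat) => (k : Int))).foldl
        (fun oa i => oa.setIfInBounds ((rs + i) % 360).toNat true) oa with hPdef
    have hPlen : P.size = 360 := by rw [hPdef, paint_size]; exact h
    by_cases hap : (a:Int) = (rs + (n:Int)) % 360
    · have hidx : ((rs + (n:Int)) % 360).toNat = a := by omega
      rw [Array.getD_eq_getD_getElem?, Array.getElem?_setIfInBounds, if_pos hidx,
          if_pos (by omega)]
      simp
      omega
    · have hidx : ((rs + (n:Int)) % 360).toNat ≠ a := by omega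
      rw [Array.getD_eq_getD_getElem?, Array.getElem?_setIfInBounds, if_neg hidx,
          ← Array.getD_eq_getD_getElem?, hPdef, ih oa a h ha]
      have hiff : ((((a:Int) - rs) % 360) < ((n:Nat):Int)) ↔ ((((a:Int) - rs) % 360) < (((n:Nat)+1 : Nat):Int)) := by
        push_cast
        omega
      rw [decide_eq_decide.mpr hiff]

-- the fold over wedges inside get_open_angles, characterised pointwise
lemma get_open_fold (speed t : Int) : ∀ (wedges : List (Int × Int)) (oa : Array Bool) (a : Nat),
    oa.size = 360 → a < 360 →
    (wedges.foldl (fun oa w =>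
        let rotated_start := PySem.Int.mod (w.1 + speed * t) 360
        (PySem.List.pyRange 0 (w.2 + 1) 1).foldl (fun oa i =>
          oa.setIfInBounds (PySem.Int.mod (rotated_start + i) 360).toNat true) oa) oa).getD a false
      = (oa.getD a false || wedges.any (fun wd => decide (PySem.Int.mod ((a:Int) - wd.1 - speed * t) 360 ≤ wd.2))) := by
  intro wedges
  induction wedges with
  | nil => intro oa a h ha; simp
  | cons w ws ih =>
    intro oa a h ha
    simp only [List.foldl_cons, List.any_cons, pmod360]
    simp only [pmod360] at ih
    set st := speed * t with hst
    set rs := (w.1 + st) % 360 with hrs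
    by_cases he : w.2 + 1 ≤ 0
    · rw [PySem.List.pyRange_one_eq_nil he, List.foldl_nil, ih oa a h ha]
      have hfalse : ¬ (((a:Int) - w.1 - st) % 360 ≤ w.2) := by omega
      simp [hfalse]
    · have hrange : PySem.List.pyRange 0 (w.2 + 1) 1
          = ((List.range ((w.2 + 1).toNat)).map (fun (k : Nat) => (k : Int))) := by
        rw [PySem.List.pyRange_one]
        simp only [sub_zero, zero_add]
      rw [hrange]
      have hlen2 : ((((List.range ((w.2 + 1).toNat)).map (fun (k : Nat) => (k : Int))).foldl
          (fun oa i => oa.setIfInBounds ((rs + i) % 360).toNat true) oa)).size = 360 := by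
        rw [paint_size]; exact h
      rw [ih _ a hlen2 ha, paint_getD rs ((w.2 + 1).toNat) oa a h ha]
      have hiff : ((((a:Int) - rs) % 360) < (((w.2 + 1).toNat : Nat) : Int))
          ↔ (((a:Int) - w.1 - st) % 360 ≤ w.2) := by
        rw [hrs]
        omega
      rw [decide_eq_decide.mpr hiff, Bool.or_assoc]

-- get_open_angles, characterised pointwise
lemma get_open_getD (speed : Int) (wedges : List (Int × Int)) (t : Int) (a : Nat) (ha : a < 360) :
    (get_open_angles speed wedges t).getD a false
      = wedges.any (fun wd => decide (PySem.Int.mod ((a:Int) - wd.1 - speed * t) 360 ≤ wd.2)) := by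
  unfold get_open_angles
  rw [get_open_fold speed t wedges (Array.replicate 360 false) a (by simp) ha]
  rw [Array.getD_eq_getD_getElem?, Array.getElem?_replicate]
  simp [ha]

-- the inner AND loop, characterised pointwise
lemma and_getD (cur : Array Bool) :
    ∀ (n : Nat) (ao : Array Bool) (a : Nat), ao.size = 360 → a < 360 →
      (((List.range n).map (fun (k : Nat) => (k : Int))).foldl
          (fun ao i => ao.setIfInBounds i.toNat (ao.getD i.toNat false && cur.getD i.toNat false)) ao).getD a false
        = (if a < n then ao.getD a false && cur.getD a false else ao.getD a false) := by
  intro n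
  induction n with
  | zero => intro ao a h ha; simp
  | succ n ih =>
    intro ao a h ha
    rw [List.range_succ, List.map_append, List.foldl_append]
    simp only [List.map_cons, List.map_nil, List.foldl_cons, List.foldl_nil, Int.toNat_natCast]
    set P := ((List.range n).map (fun (k : Nat) => (k : Int))).foldl
        (fun ao i => ao.setIfInBounds i.toNat (ao.getD i.toNat false && cur.getD i.toNat false)) ao with hPdef
    have hPlen : P.size = 360 := by rw [hPdef, and_size]; exact h
    have hPn : P.getD n false = ao.getD n false := by
      by_cases hn : n < 360
      · rw [hPdef, ih ao n h hn]
        simp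
      · rw [Array.getD_eq_getD_getElem?, Array.getElem?_eq_none (by omega),
            Array.getD_eq_getD_getElem?, Array.getElem?_eq_none (by omega)]
    rw [hPn]
    by_cases hcase : a = n
    · subst hcase
      rw [Array.getD_eq_getD_getElem?, Array.getElem?_setIfInBounds, if_pos rfl, if_pos (by omega)]
      simp
    · rw [Array.getD_eq_getD_getElem?, Array.getElem?_setIfInBounds, if_neg (by omega),
          ← Array.getD_eq_getD_getElem?, hPdef, ih ao a h ha]
      by_cases hlt : a < n
      · have h2 : a < n + 1 := by omega
        simp [hlt, h2]
      · have h2 : ¬ a < n + 1 := by omega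
        simp [hlt, h2]

-- the fold over wheels inside aBody, characterised pointwise
lemma aBody_fold (t : Int) : ∀ (wheels : List (Int × (List (Int × Int)))) (ao : Array Bool) (a : Nat),
    ao.size = 360 → a < 360 →
    (wheels.foldl (fun all_open w =>
        let current_open := get_open_angles w.1 w.2 t
        (PySem.List.pyRange 0 360 1).foldl (fun ao i =>
          ao.setIfInBounds i.toNat (ao.getD i.toNat false && current_open.getD i.toNat false)) all_open) ao).getD a false
      = (ao.getD a false && wheels.all (fun w => is_open w.1 w.2 t ↑a)) := by
  intro wheels
  induction wheels with
  | nil => intro ao a h ha; simp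
  | cons w ws ih =>
    intro ao a h ha
    have hrange : PySem.List.pyRange 0 360 1
        = ((List.range 360).map (fun (k : Nat) => (k : Int))) := by
      rw [PySem.List.pyRange_one]
      simp only [sub_zero, zero_add]
      rw [show ((360:Int)).toNat = 360 from by decide]
    simp only [List.foldl_cons, List.all_cons]
    dsimp only at ih ⊢
    rw [hrange] at ih ⊢
    set cur := get_open_angles w.1 w.2 t with hcur
    have hlen2 : (((List.range 360).map (fun (k : Nat) => (k : Int))).foldl
        (fun ao i => ao.setIfInBounds i.toNat (ao.getD i.toNat false && cur.getD i.toNat false)) ao).size = 360 := by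
      rw [and_size]; exact h
    rw [ih _ a hlen2 ha, and_getD cur 360 ao a h ha, if_pos ha]
    have hcura : cur.getD a false = is_open w.1 w.2 t ↑a := by
      rw [hcur, get_open_getD w.1 w.2 t a ha]
      rfl
    rw [hcura, Bool.and_assoc]

lemma aBody_getD (wheels : List (Int × (List (Int × Int)))) (t : Int) (a : Nat) (ha : a < 360) :
    (aBody wheels t).getD a false = wheels.all (fun w => is_open w.1 w.2 t ↑a) := by
  unfold aBody
  rw [aBody_fold t wheels (Array.replicate 360 true) a (by simp) ha]
  rw [Array.getD_eq_getD_getElem?, Array.getElem?_replicate]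
  simp [ha]

lemma cond_eq (wheels : List (Int × (List (Int × Int)))) (t : Nat) :
    (PySem.List.pyRange 0 360 1).any (fun i => (aBody wheels ↑t).getD i.toNat false)
      = (PySem.List.pyRange 0 360 1).any (fun a => wheels.all (fun w => is_open w.1 w.2 ↑t a)) := by
  apply any_congr
  intro i hi
  have hmem := (PySem.List.mem_pyRange_one).1 hi
  have hi0 : 0 ≤ i := hmem.1
  have hilt : i < 360 := hmem.2
  rw [aBody_getD wheels ↑t i.toNat (by omega)]
  have hcast : ((i.toNat : Nat) : Int) = i := by omega
  rw [hcast]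

lemma loop_eq (wheels : List (Int × (List (Int × Int)))) :
    ∀ (t : Nat), aLoop wheels t = bLoop wheels t := by
  have key : ∀ (fuel t : Nat), 360 - t ≤ fuel → aLoop wheels t = bLoop wheels t := by
    intro fuel
    induction fuel with
    | zero =>
      intro t ht
      have h360 : ¬ t < 360 := by omega
      rw [aLoop, bLoop, if_neg h360, if_neg h360]
    | succ n ih =>
      intro t ht
      rw [aLoop, bLoop]
      by_cases h : t < 360
      · rw [if_pos h, if_pos h]
        dsimp only
        rw [cond_eq wheels t]
        by_cases hc : (PySem.List.pyRange 0 360 1).any (fun a => wheels.all (fun w => is_open w.1 w.2 ↑t a)) = true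
        · rw [if_pos hc, if_pos hc]
        · rw [if_neg hc, if_neg hc, ih (t + 1) (by omega)]
      · rw [if_neg h, if_neg h]
  intro t
  exact key 360 t (by omega)

-- ===== VERDICT (by name: the statement is the Claim_ definition above) =====
theorem find_alignment_time_spec : Claim_equal_find_alignment_time := by
  intro wheels _
  show find_alignment_time wheels = find_alignment_time_alt wheels
  unfold find_alignment_time find_alignment_time_alt
  exact loop_eq wheels 0
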